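-- pv_equiv track=rewrite | github.com/KAMRANKHANALWI/Graph | code/2_traversal/traversal_comparison.py | create_level_structure
-- ===== SOURCE A (Python) =====
-- def create_level_structure(graph, start):
--     """
--     Create level structure for visualization
--     """
--     visited = set([start])
--     current_level = [start]
--     levels = {0: [start]}
--     level = 0
--
--     while current_level:
--         next_level = []
--         for node in current_level:
--             for neighbor in graph.get(node, []):
--                 if neighbor not in visited:
--                     visited.add(neighbor)
--                     next_level.append(neighbor)
--
--         if next_level:
--             level += 1
--             levels[level] = next_level
--             current_level = next_level
--         else:
--             break
--
--     return levels
-- ===== SOURCE B (Python) =====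
-- from collections import deque
--
--
-- def create_level_structure(graph, start):
--     """
--     Create level structure for visualization
--     """
--     visited = {start}
--     levels = {0: [start]}
--     queue = deque([(start, 0)])
--
--     while queue:
--         node, d = queue.popleft()
--         for neighbor in graph.get(node, []):
--             if neighbor not in visited:
--                 visited.add(neighbor)
--                 levels.setdefault(d + 1, []).append(neighbor)
--                 queue.append((neighbor, d + 1))
--
--     return levels
-- ===== Notes on version B (the rewrite author's own statement) =====
-- stated objective: alternative
-- what changed: A's level-synchronous BFS (rebuild a next_level frontier list per while-iteration, then bulk-insert it into levels) is replaced by a single FIFO queue of (node, depth) pairs with one pop-loop that records each node into levels.setdefault(depth, []) as it is discovered.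
import Mathlib
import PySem

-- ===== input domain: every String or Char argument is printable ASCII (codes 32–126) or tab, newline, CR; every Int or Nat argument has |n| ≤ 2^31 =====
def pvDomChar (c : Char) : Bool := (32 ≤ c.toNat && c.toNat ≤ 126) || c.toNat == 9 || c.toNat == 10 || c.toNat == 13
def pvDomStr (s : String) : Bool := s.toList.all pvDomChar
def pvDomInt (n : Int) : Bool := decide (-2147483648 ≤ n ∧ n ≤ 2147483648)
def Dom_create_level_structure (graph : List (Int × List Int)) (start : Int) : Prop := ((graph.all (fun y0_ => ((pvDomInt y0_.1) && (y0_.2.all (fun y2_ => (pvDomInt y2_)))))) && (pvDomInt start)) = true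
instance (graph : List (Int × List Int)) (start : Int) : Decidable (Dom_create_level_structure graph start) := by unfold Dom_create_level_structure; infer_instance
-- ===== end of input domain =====

-- B replaces A's level-synchronous frontier loop by a single FIFO queue of (node, depth)
-- pairs feeding levels.setdefault — a different decomposition of BFS (objective: alternative).
-- The while loops are ported with a fuel counter pvFuel (1 + total number of listed
-- neighbors), a port artifact that suffices for either loop to run to completion.

-- fuel bound shared by both ports: one unit per possible discovery
def pvFuel (graph : List (Int × List Int)) : Nat :=
  1 + (graph.flatMap (fun p => p.2)).length

-- ===== PORT A =====
-- A's inner 'if neighbor not in visited: visited.add(neighbor); next_level.append(neighbor)'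
def pvVisit (st : PySem.Set Int × List Int) (nb : Int) : PySem.Set Int × List Int :=
  if PySem.Set.contains st.1 nb then st else (PySem.Set.add st.1 nb, st.2 ++ [nb])

-- A's 'for neighbor in graph.get(node, [])'
def pvExpandNode (graph : PySem.Dict Int (List Int)) (st : PySem.Set Int × List Int)
    (node : Int) : PySem.Set Int × List Int :=
  (graph.getD node []).foldl pvVisit st

-- A's 'while current_level' loop
def pvALoop (graph : PySem.Dict Int (List Int)) :
    Nat → PySem.Set Int → List Int → PySem.Dict Int (List Int) → Int →
    PySem.Dict Int (List Int)
  | 0, _, _, levels, _ => levels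
  | fuel+1, visited, cur, levels, level =>
    if cur = [] then levels
    else
      let st := cur.foldl (pvExpandNode graph) (visited, [])
      if st.2 = [] then levels
      else pvALoop graph fuel st.1 st.2 (levels.insert (level + 1) st.2) (level + 1)

def create_level_structure (graph : List (Int × List Int)) (start : Int) : List (Int × List Int) :=
  (pvALoop (PySem.Dict.mk graph) (pvFuel graph) (PySem.Set.ofList [start]) [start]
    (PySem.Dict.mk [(0, [start])]) 0).items

-- ===== PORT B =====
-- body of B's 'for neighbor in graph.get(node, [])' at popped depth d:
-- 'levels.setdefault(d+1, []).append(neighbor)' is Dict.modify (d+1) [] (· ++ [nb])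
def pvVisitB (d : Int) (st : PySem.Set Int × List (Int × Int) × PySem.Dict Int (List Int))
    (nb : Int) : PySem.Set Int × List (Int × Int) × PySem.Dict Int (List Int) :=
  if PySem.Set.contains st.1 nb then st
  else (PySem.Set.add st.1 nb, st.2.1 ++ [(nb, d + 1)], st.2.2.modify (d + 1) [] (· ++ [nb]))

-- B's 'while queue: node, d = queue.popleft(); …'
def pvBLoop (graph : PySem.Dict Int (List Int)) :
    Nat → PySem.Set Int → List (Int × Int) → PySem.Dict Int (List Int) →
    PySem.Dict Int (List Int)
  | 0, _, _, levels => levels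
  | _+1, _, [], levels => levels
  | fuel+1, visited, (node, d) :: rest, levels =>
    let st := (graph.getD node []).foldl (pvVisitB d) (visited, rest, levels)
    pvBLoop graph fuel st.1 st.2.1 st.2.2

def create_level_structure_alt (graph : List (Int × List Int)) (start : Int) : List (Int × List Int) :=
  (pvBLoop (PySem.Dict.mk graph) (pvFuel graph) (PySem.Set.ofList [start]) [(start, 0)]
    (PySem.Dict.mk [(0, [start])])).items

-- ===== PRECONDITION & SPEC =====
def Spec_create_level_structure (graph : List (Int × List Int)) (start : Int) (out : List (Int × List Int)) : Prop := out = create_level_structure_alt graph start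
instance (graph : List (Int × List Int)) (start : Int) (out : List (Int × List Int)) : Decidable (Spec_create_level_structure graph start out) := by unfold Spec_create_level_structure; infer_instance

-- ===== CLAIM (what is proved, stated in full; the proofs are below) =====
def Claim_equal_create_level_structure : Prop := ∀ (graph : List (Int × List Int)) (start : Int), Dom_create_level_structure graph start → Spec_create_level_structure graph start (create_level_structure graph start)

-- ===== LEMMAS AND PROOFS =====

-- B's 'levels' mid-level: base plus (if nonempty) the partial list p at the fresh key k
def pvLv (base : PySem.Dict Int (List Int)) (k : Int) (p : List Int) :
    PySem.Dict Int (List Int) :=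
  if p = [] then base else PySem.Dict.mk (base.items ++ [(k, p)])

theorem pvLv_modify (base : PySem.Dict Int (List Int)) (k : Int) (p : List Int) (nb : Int)
    (h : base.contains k = false) :
    (pvLv base k p).modify k [] (· ++ [nb]) = pvLv base k (p ++ [nb]) := by
  have hall : ∀ q ∈ base.items, ¬ (q.1 == k) = true := by
    intro q hq hqk
    have : base.contains k = true := by
      simp only [PySem.Dict.contains, List.any_eq_true]
      exact ⟨q, hq, hqk⟩
    simp [this] at h
  have hfind : base.items.find? (fun q => q.1 == k) = none := by
    rw [List.find?_eq_none]; exact hall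
  by_cases hp : p = []
  · subst hp
    have hg : (pvLv base k []).getD k [] = [] := by
      simp [pvLv, PySem.Dict.getD, PySem.Dict.get?, hfind]
    simp only [pvLv] at hg ⊢
    simp only [PySem.Dict.modify, hg]
    simp [PySem.Dict.insert, h]
  · simp only [pvLv, if_neg hp, if_neg (show ¬ p ++ [nb] = [] by simp)]
    have hfind2 : (base.items ++ [(k, p)]).find? (fun q => q.1 == k) = some (k, p) := by
      rw [List.find?_append, hfind]; simp
    have hcont2 : (PySem.Dict.mk (base.items ++ [(k, p)])).contains k = true := by
      simp [PySem.Dict.contains]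
    simp only [PySem.Dict.modify, PySem.Dict.getD, PySem.Dict.get?, PySem.Dict.insert, hcont2,
      if_true]
    simp only [hfind2]
    congr 1
    simp only [List.map_append]
    rw [List.map_congr_left (fun q hq => if_neg (hall q hq))]
    simp

-- one ('visited', 'next_level') step appends to both or to neither
theorem pvVisit_len (nbs : List Int) : ∀ (v : PySem.Set Int) (p : List Int),
    (nbs.foldl pvVisit (v, p)).1.length + p.length
      = v.length + (nbs.foldl pvVisit (v, p)).2.length := by
  induction nbs with
  | nil => intro v p; simp
  | cons nb t ih =>
    intro v p
    simp only [List.foldl_cons, pvVisit]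
    by_cases hc : PySem.Set.contains v nb
    · simp only [hc, if_true]; exact ih v p
    · simp only [hc, if_false, Bool.false_eq_true]
      have := ih (PySem.Set.add v nb) (p ++ [nb])
      have hnb : nb ∉ v := by simpa [PySem.Set.contains] using hc
      have hadd : (PySem.Set.add v nb).length = v.length + 1 := by
        simp [PySem.Set.add, hnb]
      simp [hadd, List.length_append] at this ⊢
      omega

theorem pvVisit_subset (nbs : List Int) : ∀ (v : PySem.Set Int) (p : List Int),
    ∀ x ∈ (nbs.foldl pvVisit (v, p)).1, x ∈ v ∨ x ∈ nbs := by
  induction nbs with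
  | nil => intro v p x hx; exact Or.inl hx
  | cons nb t ih =>
    intro v p x hx
    simp only [List.foldl_cons, pvVisit] at hx
    by_cases hc : PySem.Set.contains v nb
    · simp only [hc, if_true] at hx
      rcases ih v p x hx with h | h
      · exact Or.inl h
      · exact Or.inr (List.mem_cons_of_mem _ h)
    · simp only [hc, if_false, Bool.false_eq_true] at hx
      rcases ih _ _ x hx with h | h
      · simp only [PySem.Set.add, hc, if_false, Bool.false_eq_true, List.mem_append,
          List.mem_singleton] at h
        rcases h with h | h
        · exact Or.inl h
        · exact Or.inr (h ▸ List.mem_cons_self)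
      · exact Or.inr (List.mem_cons_of_mem _ h)

theorem pvVisit_nodup (nbs : List Int) : ∀ (v : PySem.Set Int) (p : List Int), v.Nodup →
    (nbs.foldl pvVisit (v, p)).1.Nodup := by
  induction nbs with
  | nil => intro v p h; exact h
  | cons nb t ih =>
    intro v p h
    simp only [List.foldl_cons, pvVisit]
    by_cases hc : PySem.Set.contains v nb
    · simp only [hc, if_true]; exact ih v p h
    · simp only [hc, if_false, Bool.false_eq_true]
      exact ih _ _ (PySem.Set.nodup_add v nb h)

-- B's neighbor loop at depth d simulates A's neighbor loop
theorem pvFoldB_eq (d : Int) (nbs : List Int) :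
    ∀ (v : PySem.Set Int) (q : List (Int × Int)) (p : List Int)
      (base : PySem.Dict Int (List Int)), base.contains (d + 1) = false →
    nbs.foldl (pvVisitB d) (v, q ++ p.map (fun n => (n, d + 1)), pvLv base (d + 1) p)
      = ((nbs.foldl pvVisit (v, p)).1,
         q ++ ((nbs.foldl pvVisit (v, p)).2).map (fun n => (n, d + 1)),
         pvLv base (d + 1) (nbs.foldl pvVisit (v, p)).2) := by
  induction nbs with
  | nil => intro v q p base hb; rfl
  | cons nb t ih =>
    intro v q p base hb
    simp only [List.foldl_cons, pvVisitB, pvVisit]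
    by_cases hc : PySem.Set.contains v nb
    · simp only [hc, if_true]
      exact ih v q p base hb
    · simp only [hc, if_false, Bool.false_eq_true]
      have hstep : (q ++ p.map (fun n => (n, d + 1))) ++ [(nb, d + 1)]
          = q ++ (p ++ [nb]).map (fun n => (n, d + 1)) := by simp
      rw [show ((PySem.Set.add v nb,
            (q ++ p.map (fun n => (n, d+1))) ++ [(nb, d+1)],
            (pvLv base (d+1) p).modify (d+1) [] (· ++ [nb])))
          = ((PySem.Set.add v nb,
            q ++ (p ++ [nb]).map (fun n => (n, d+1)),
            pvLv base (d+1) (p ++ [nb]))) by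
        rw [hstep, pvLv_modify base (d+1) p nb hb]]
      exact ih (PySem.Set.add v nb) q (p ++ [nb]) base hb

-- expand-level cardinality / membership / nodup, lifted over a whole level
theorem pvExpand_len (graph : PySem.Dict Int (List Int)) (cur : List Int) :
    ∀ (v : PySem.Set Int) (p : List Int),
    (cur.foldl (pvExpandNode graph) (v, p)).1.length + p.length
      = v.length + (cur.foldl (pvExpandNode graph) (v, p)).2.length := by
  induction cur with
  | nil => intro v p; simp
  | cons node t ih =>
    intro v p
    simp only [List.foldl_cons]
    have h1 := pvVisit_len (graph.getD node []) v p
    rcases hE : (graph.getD node []).foldl pvVisit (v, p) with ⟨v', p'⟩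
    rw [hE] at h1
    have h1' : v'.length + p.length = v.length + p'.length := by simpa using h1
    have h2 := ih v' p'
    simp only [pvExpandNode, hE]
    omega

theorem pvExpand_subset (graph : PySem.Dict Int (List Int)) (U : List Int)
    (hU : ∀ node : Int, ∀ x ∈ graph.getD node [], x ∈ U) (cur : List Int) :
    ∀ (v : PySem.Set Int) (p : List Int), (∀ x ∈ v, x ∈ U) →
    ∀ x ∈ (cur.foldl (pvExpandNode graph) (v, p)).1, x ∈ U := by
  induction cur with
  | nil => intro v p hv x hx; exact hv x hx
  | cons node t ih =>
    intro v p hv x hx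
    simp only [List.foldl_cons, pvExpandNode] at hx
    rcases hE : (graph.getD node []).foldl pvVisit (v, p) with ⟨v', p'⟩
    rw [hE] at hx
    refine ih v' p' ?_ x hx
    intro y hy
    have := pvVisit_subset (graph.getD node []) v p y (by rw [hE]; exact hy)
    rcases this with h | h
    · exact hv y h
    · exact hU node y h

theorem pvExpand_nodup (graph : PySem.Dict Int (List Int)) (cur : List Int) :
    ∀ (v : PySem.Set Int) (p : List Int), v.Nodup →
    (cur.foldl (pvExpandNode graph) (v, p)).1.Nodup := by
  induction cur with
  | nil => intro v p h; exact h
  | cons node t ih =>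
    intro v p h
    simp only [List.foldl_cons, pvExpandNode]
    rcases hE : (graph.getD node []).foldl pvVisit (v, p) with ⟨v', p'⟩
    exact ih v' p' (by have := pvVisit_nodup (graph.getD node []) v p h; rwa [hE] at this)

theorem pvNodup_length_le (v U : List Int) (h : v.Nodup) (hsub : ∀ x ∈ v, x ∈ U) :
    v.length ≤ U.length := by
  classical
  calc v.length = v.toFinset.card := (List.toFinset_card_of_nodup h).symm
    _ ≤ U.toFinset.card := Finset.card_le_card (by
        intro x hx
        simp only [List.mem_toFinset] at hx ⊢
        exact hsub x hx)
    _ ≤ U.length := List.toFinset_card_le U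

theorem pvBLoop_nil (graph : PySem.Dict Int (List Int)) (f : Nat) (v : PySem.Set Int)
    (lv : PySem.Dict Int (List Int)) : pvBLoop graph f v [] lv = lv := by
  cases f <;> rfl

-- B pops a whole level: |cur| pops of depth-L nodes leave exactly A's next level enqueued
theorem pvBLoop_level (graph : PySem.Dict Int (List Int)) (L : Int) (cur : List Int) :
    ∀ (g : Nat) (v : PySem.Set Int) (p : List Int) (base : PySem.Dict Int (List Int)),
      base.contains (L + 1) = false →
    pvBLoop graph (cur.length + g) v
        (cur.map (fun n => (n, L)) ++ p.map (fun n => (n, L + 1))) (pvLv base (L + 1) p)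
      = pvBLoop graph g (cur.foldl (pvExpandNode graph) (v, p)).1
          ((cur.foldl (pvExpandNode graph) (v, p)).2.map (fun n => (n, L + 1)))
          (pvLv base (L + 1) (cur.foldl (pvExpandNode graph) (v, p)).2) := by
  induction cur with
  | nil => intro g v p base hb; simp
  | cons node t ih =>
    intro g v p base hb
    have hlen : (node :: t).length + g = (t.length + g) + 1 := by
      simp [Nat.succ_add]
    rw [hlen]
    simp only [List.map_cons, List.cons_append]
    show pvBLoop graph ((t.length + g) + 1) v
        ((node, L) :: (t.map (fun n => (n, L)) ++ p.map (fun n => (n, L + 1))))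
        (pvLv base (L + 1) p) = _
    rw [pvBLoop]
    have hfold := pvFoldB_eq L (graph.getD node []) v (t.map (fun n => (n, L))) p base hb
    simp only [hfold]
    have := ih (g) ((graph.getD node []).foldl pvVisit (v, p)).1
      ((graph.getD node []).foldl pvVisit (v, p)).2 base hb
    simpa [pvExpandNode, List.foldl_cons] using this

-- main simulation: given enough fuel on both sides, the two loops agree
theorem pvMain (graph : PySem.Dict Int (List Int)) (U : List Int)
    (hU : ∀ node : Int, ∀ x ∈ graph.getD node [], x ∈ U) :
    ∀ (fa fb : Nat) (v : PySem.Set Int) (cur : List Int)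
      (base : PySem.Dict Int (List Int)) (level : Int),
      v.Nodup → (∀ x ∈ v, x ∈ U) → cur ≠ [] →
      (∀ k ∈ base.keys, k ≤ level) →
      U.length + 1 ≤ fa + v.length →
      cur.length + U.length ≤ fb + v.length →
    pvALoop graph fa v cur base level
      = pvBLoop graph fb v (cur.map (fun n => (n, level))) base := by
  intro fa
  induction fa with
  | zero =>
    intro fb v cur base level hnd hvU hcur hkeys hA hB
    have := pvNodup_length_le v U hnd hvU
    omega
  | succ fa ih =>
    intro fb v cur base level hnd hvU hcur hkeys hA hB
    have hvlen : v.length ≤ U.length := pvNodup_length_le v U hnd hvU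
    have hbase : base.contains (level + 1) = false := by
      by_contra hc
      have hc' : base.contains (level + 1) = true := by
        cases h : base.contains (level + 1) <;> simp_all
      have : (level + 1) ∈ base.keys := by
        rw [← PySem.Dict.contains_iff_mem_keys]; exact hc'
      have := hkeys _ this
      omega
    obtain ⟨g, hg⟩ : ∃ g, fb = cur.length + g := by
      refine ⟨fb - cur.length, ?_⟩; omega
    subst hg
    have hBlevel := pvBLoop_level graph level cur g v [] base hbase
    simp only [List.map_nil, List.append_nil] at hBlevel
    have hlv0 : pvLv base (level + 1) [] = base := by simp [pvLv]
    rw [hlv0] at hBlevel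
    rw [hBlevel]
    rw [pvALoop]
    rw [if_neg hcur]
    set E := cur.foldl (pvExpandNode graph) (v, []) with hE
    by_cases hnext : E.2 = []
    · simp only [hnext, List.map_nil, if_true, hlv0, pvBLoop_nil]
    · simp only [hnext]
      have hins : base.insert (level + 1) E.2 = pvLv base (level + 1) E.2 := by
        simp only [PySem.Dict.insert, hbase, pvLv, if_neg hnext]
        simp
      have hlen := pvExpand_len graph cur v []
      rw [← hE] at hlen
      simp only [List.length_nil] at hlen
      have hnd' : E.1.Nodup := by
        have := pvExpand_nodup graph cur v [] hnd; rwa [← hE] at this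
      have hvU' : ∀ x ∈ E.1, x ∈ U := by
        have := pvExpand_subset graph U hU cur v [] hvU; rwa [← hE] at this
      have hv'len : E.1.length ≤ U.length := pvNodup_length_le E.1 U hnd' hvU'
      have hkeys' : ∀ k ∈ (base.insert (level + 1) E.2).keys, k ≤ level + 1 := by
        intro k hk
        rcases (PySem.Dict.mem_keys_insert base (level+1) k E.2).1 hk with h | h
        · omega
        · exact le_trans (hkeys k h) (by omega)
      have hE2pos : 0 < E.2.length := List.length_pos_of_ne_nil hnext
      rw [hins]
      exact ih g E.1 E.2 (pvLv base (level + 1) E.2) (level + 1) hnd' hvU' hnext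
        (by rw [← hins]; exact hkeys') (by omega) (by omega)

-- any neighbor list the graph dict can return is listed among the graph's values
theorem pvGetD_subset (graph : List (Int × List Int)) (node : Int) :
    ∀ x ∈ (PySem.Dict.mk graph).getD node [], x ∈ graph.flatMap (fun p => p.2) := by
  intro x hx
  simp only [PySem.Dict.getD, PySem.Dict.get?] at hx
  cases hfind : (PySem.Dict.mk graph).items.find? (fun p => p.1 == node) with
  | none => rw [hfind] at hx; simp at hx
  | some q =>
    rw [hfind] at hx
    simp only [Option.map_some, Option.getD_some] at hx
    have hq : q ∈ graph := List.mem_of_find?_eq_some hfind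
    exact List.mem_flatMap.2 ⟨q, hq, hx⟩

theorem pvPorts_agree (graph : List (Int × List Int)) (start : Int) :
    create_level_structure graph start = create_level_structure_alt graph start := by
  have hof : PySem.Set.ofList [start] = [start] := rfl
  have hU : ∀ node : Int, ∀ x ∈ (PySem.Dict.mk graph).getD node [],
      x ∈ start :: graph.flatMap (fun p => p.2) := by
    intro node x hx
    exact List.mem_cons_of_mem _ (pvGetD_subset graph node x hx)
  have hlen : (start :: graph.flatMap (fun p => p.2)).length = pvFuel graph := by
    simp [pvFuel]; omega
  have := pvMain (PySem.Dict.mk graph) (start :: graph.flatMap (fun p => p.2)) hU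
    (pvFuel graph) (pvFuel graph) [start] [start] (PySem.Dict.mk [(0, [start])]) 0
    (by simp) (by intro x hx; simp at hx; simp [hx]) (by simp)
    (by intro k hk; simp [PySem.Dict.keys] at hk; omega)
    (by rw [hlen]; simp) (by rw [hlen]; simp; omega)
  unfold create_level_structure create_level_structure_alt
  rw [hof, this]
  rfl

-- ===== VERDICT (by name: the statement is the Claim_ definition above) =====
theorem create_level_structure_spec : Claim_equal_create_level_structure := by
  intro graph start _
  unfold Spec_create_level_structure
  exact pvPorts_agree graph start
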